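-- pv_equiv track=rewrite | github.com/veldanda3415/MCP_SERVERS | mcp-data-platform/demo/intent_translator.py | infer_any_column
-- ===== SOURCE A (Python) =====
-- from typing import Any
--
-- def normalize_column_name(column_name: str) -> str:
--     return column_name.strip().lower().replace("_", " ")
--
-- def infer_any_column(normalized_question: str, columns: list[dict[str, Any]], preferred_tokens: list[str] | None = None) -> str | None:
--     preferred_tokens = preferred_tokens or []
--     scored: list[tuple[int, str]] = []
--
--     for index, column in enumerate(columns):
--         column_name = str(column.get("name", ""))
--         if not column_name:
--             continue
--         normalized_column = normalize_column_name(column_name)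
--         score = 0
--         if normalized_column in normalized_question:
--             score += 100
--         singular = normalized_column[:-1] if normalized_column.endswith("s") else normalized_column
--         if singular and singular in normalized_question:
--             score += 40
--         if any(token in normalized_question and token in normalized_column for token in preferred_tokens):
--             score += 25
--         score += max(0, 10 - index)
--         scored.append((score, column_name))
--
--     if not scored:
--         return None
--     scored.sort(key=lambda item: (-item[0], item[1]))
--     return scored[0][1]
-- ===== SOURCE B (Python) =====
-- def normalize_column_name(column_name: str) -> str:
--     return column_name.strip().lower().replace("_", " ")
--
--
-- def _candidate(normalized_question, tokens, index, column):
--     """Score one column; None if it has no usable name."""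
--     column_name = str(column.get("name", ""))
--     if not column_name:
--         return None
--     normalized_column = normalize_column_name(column_name)
--     score = 0
--     if normalized_column in normalized_question:
--         score += 100
--     singular = normalized_column[:-1] if normalized_column.endswith("s") else normalized_column
--     if singular and singular in normalized_question:
--         score += 40
--     if any(t in normalized_question and t in normalized_column for t in tokens):
--         score += 25
--     score += max(0, 10 - index)
--     return (score, column_name)
--
--
-- def infer_any_column(normalized_question, columns, preferred_tokens=None):
--     tokens = preferred_tokens or []
--     best = None  # (score, name): running best, no intermediate list, no sort
--     for index, column in enumerate(columns):
--         cand = _candidate(normalized_question, tokens, index, column)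
--         if cand is None:
--             continue
--         if best is None or cand[0] > best[0] or (cand[0] == best[0] and cand[1] < best[1]):
--             best = cand
--     return None if best is None else best[1]
-- ===== Notes on version B (the rewrite author's own statement) =====
-- stated objective: alternative
-- what changed: B keeps the per-column scoring but replaces A's build-a-scored-list, sort by (-score, name), take-head pipeline with a single fused pass maintaining one running best (strict improvement test reproduces the sort's tie-break), so no intermediate list and no sort.
import Mathlib
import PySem

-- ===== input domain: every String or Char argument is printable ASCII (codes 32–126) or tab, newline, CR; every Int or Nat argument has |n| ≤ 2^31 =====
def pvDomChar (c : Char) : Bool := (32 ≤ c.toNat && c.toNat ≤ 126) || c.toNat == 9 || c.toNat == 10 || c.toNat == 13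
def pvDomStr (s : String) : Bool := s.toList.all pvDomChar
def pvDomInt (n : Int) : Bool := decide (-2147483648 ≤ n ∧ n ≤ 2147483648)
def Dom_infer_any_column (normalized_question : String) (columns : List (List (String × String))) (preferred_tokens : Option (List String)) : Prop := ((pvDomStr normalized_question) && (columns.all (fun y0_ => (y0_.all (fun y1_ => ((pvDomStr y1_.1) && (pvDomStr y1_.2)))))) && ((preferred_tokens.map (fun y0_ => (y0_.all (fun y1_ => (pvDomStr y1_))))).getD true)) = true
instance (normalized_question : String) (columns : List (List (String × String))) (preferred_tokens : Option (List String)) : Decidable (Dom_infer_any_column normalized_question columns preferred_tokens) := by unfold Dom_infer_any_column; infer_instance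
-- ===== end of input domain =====

-- B replaces A's scored-list + sort + head with a single fused pass keeping one running best;
-- objective: alternative decomposition (no intermediate list, no sort). Return-value equivalence only (neither mutates).

-- shared module helper (present verbatim in both Pythons)
def normalize_column_name (column_name : String) : String :=
  PySem.Str.replace (PySem.Str.lower (PySem.Str.strip column_name)) "_" " "

-- ===== PORT A =====
def infer_any_column (normalized_question : String) (columns : List (List (String × String))) (preferred_tokens : Option (List String)) : Option String :=
  let tokens := preferred_tokens.getD []
  let scored : List (Int × String) :=
    (PySem.List.enumerate columns).foldl (fun scored ic =>
      let column_name := PySem.Dict.getD (PySem.Dict.mk ic.2) "name" ""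
      if column_name = "" then scored
      else
        let normalized_column := normalize_column_name column_name
        let score : Int := 0
        let score := if PySem.Str.isIn normalized_column normalized_question then score + 100 else score
        let singular := if PySem.Str.endswith normalized_column "s" then PySem.Str.slice normalized_column none (some (-1)) else normalized_column
        let score := if singular ≠ "" && PySem.Str.isIn singular normalized_question then score + 40 else score
        let score := if tokens.any (fun t => PySem.Str.isIn t normalized_question && PySem.Str.isIn t normalized_column) then score + 25 else score
        let score := score + max 0 (10 - ic.1)
        scored ++ [(score, column_name)]) []
  if scored = [] then none
  else
    match PySem.List.sorted2 scored (fun item => -item.1) (fun item => item.2) with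
    | [] => none
    | h :: _ => some h.2

-- ===== PORT B =====
-- B helper: score one column, none if it has no usable name
def candidateB (normalized_question : String) (tokens : List String) (index : Int) (column : List (String × String)) : Option (Int × String) :=
  let column_name := PySem.Dict.getD (PySem.Dict.mk column) "name" ""
  if column_name = "" then none
  else
    let normalized_column := normalize_column_name column_name
    let score : Int := 0
    let score := if PySem.Str.isIn normalized_column normalized_question then score + 100 else score
    let singular := if PySem.Str.endswith normalized_column "s" then PySem.Str.slice normalized_column none (some (-1)) else normalized_column
    let score := if singular ≠ "" && PySem.Str.isIn singular normalized_question then score + 40 else score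
    let score := if tokens.any (fun t => PySem.Str.isIn t normalized_question && PySem.Str.isIn t normalized_column) then score + 25 else score
    let score := score + max 0 (10 - index)
    some (score, column_name)

def infer_any_column_alt (normalized_question : String) (columns : List (List (String × String))) (preferred_tokens : Option (List String)) : Option String :=
  let tokens := preferred_tokens.getD []
  let best : Option (Int × String) :=
    (PySem.List.enumerate columns).foldl (fun best ic =>
      match candidateB normalized_question tokens ic.1 ic.2 with
      | none => best
      | some cand =>
        match best with
        | none => some cand
        | some b =>
          if cand.1 > b.1 || (cand.1 == b.1 && decide (cand.2 < b.2)) then some cand else some b) none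
  best.map (fun b => b.2)

-- ===== PRECONDITION & SPEC =====
def Spec_infer_any_column (normalized_question : String) (columns : List (List (String × String))) (preferred_tokens : Option (List String)) (out : Option String) : Prop := out = infer_any_column_alt normalized_question columns preferred_tokens
instance (normalized_question : String) (columns : List (List (String × String))) (preferred_tokens : Option (List String)) (out : Option String) : Decidable (Spec_infer_any_column normalized_question columns preferred_tokens out) := by unfold Spec_infer_any_column; infer_instance

-- ===== CLAIM (what is proved, stated in full; the proofs are below) =====
def Claim_equal_infer_any_column : Prop := ∀ (normalized_question : String) (columns : List (List (String × String))) (preferred_tokens : Option (List String)), Dom_infer_any_column normalized_question columns preferred_tokens → Spec_infer_any_column normalized_question columns preferred_tokens (infer_any_column normalized_question columns preferred_tokens)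

-- ===== LEMMAS AND PROOFS =====

-- the running-best step extracted from a stable sort's insertBy head
def minStep {α : Type} (lt : α → α → Bool) (b : Option α) (x : α) : Option α :=
  match b with
  | none => some x
  | some b0 => some (if lt x b0 then x else b0)

-- A's sort key (-score, name) as a strict "comes before" test
def ltA (a b : Int × String) : Bool :=
  decide (-a.1 < -b.1) || (!decide (-b.1 < -a.1) && decide (a.2 < b.2))

theorem head?_insertBy {α : Type} (lt : α → α → Bool) (x : α) (acc : List α) :
    (PySem.List.insertBy lt x acc).head? = minStep lt acc.head? x := by
  cases acc with
  | nil => simp [PySem.List.insertBy, minStep]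
  | cons h t =>
    simp only [PySem.List.insertBy, minStep, List.head?_cons]
    split
    · simp_all
    · simp_all

theorem head_foldl_insertBy {α : Type} (lt : α → α → Bool) (l : List α) (acc : List α) :
    (l.foldl (fun acc x => PySem.List.insertBy lt x acc) acc).head? = l.foldl (minStep lt) acc.head? := by
  induction l generalizing acc with
  | nil => rfl
  | cons x t ih => simp only [List.foldl_cons, ih, head?_insertBy]

theorem foldl_build {β γ : Type} (g : β → Option γ) (l : List β) (acc : List γ) :
    l.foldl (fun s p => (g p).elim s (fun x => s ++ [x])) acc = acc ++ l.filterMap g := by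
  induction l generalizing acc with
  | nil => simp
  | cons p t ih => cases hg : g p <;> simp [ih, hg]

theorem foldl_filterMap {β γ σ : Type} (g : β → Option γ) (step : σ → γ → σ) (l : List β) (b : σ) :
    (l.filterMap g).foldl step b = l.foldl (fun b p => (g p).elim b (step b)) b := by
  induction l generalizing b with
  | nil => rfl
  | cons p t ih => cases hg : g p <;> simp [ih, hg]

theorem stepB_eq_minStep (b : Option (Int × String)) (x : Int × String) :
    (match b with
     | none => some x
     | some b0 => if x.1 > b0.1 || (x.1 == b0.1 && decide (x.2 < b0.2)) then some x else some b0)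
    = minStep ltA b x := by
  cases b with
  | none => rfl
  | some b0 =>
    simp only [minStep, ltA, apply_ite (f := fun y => some (α := Int × String) y)]
    congr 1
    by_cases h1 : b0.1 < x.1 <;> by_cases h2 : x.1 = b0.1 <;>
      simp [h1, h2]
    all_goals omega

theorem match_head (l : List (Int × String)) :
    (match l with | [] => (none : Option String) | h :: _ => some h.2) = l.head?.map (fun b => b.2) := by
  cases l <;> rfl

-- ===== VERDICT (by name: the statement is the Claim_ definition above) =====
theorem infer_any_column_spec : Claim_equal_infer_any_column := by
  intro q columns preferred_tokens _
  unfold Spec_infer_any_column infer_any_column infer_any_column_alt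
  simp only []
  set tokens := preferred_tokens.getD [] with htok
  -- A's per-element step is candidateB threaded through an append
  have hstepA : (fun (scored : List (Int × String)) (ic : Int × List (String × String)) =>
      let column_name := PySem.Dict.getD (PySem.Dict.mk ic.2) "name" ""
      if column_name = "" then scored
      else
        let normalized_column := normalize_column_name column_name
        let score : Int := 0
        let score := if PySem.Str.isIn normalized_column q then score + 100 else score
        let singular := if PySem.Str.endswith normalized_column "s" then PySem.Str.slice normalized_column none (some (-1)) else normalized_column
        let score := if singular ≠ "" && PySem.Str.isIn singular q then score + 40 else score
        let score := if tokens.any (fun t => PySem.Str.isIn t q && PySem.Str.isIn t normalized_column) then score + 25 else score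
        let score := score + max 0 (10 - ic.1)
        scored ++ [(score, column_name)])
      = (fun s p => (candidateB q tokens p.1 p.2).elim s (fun x => s ++ [x])) := by
    funext s p
    simp only [candidateB]
    split <;> simp
  have hstepB : (fun (best : Option (Int × String)) (ic : Int × List (String × String)) =>
      match candidateB q tokens ic.1 ic.2 with
      | none => best
      | some cand =>
        match best with
        | none => some cand
        | some b =>
          if cand.1 > b.1 || (cand.1 == b.1 && decide (cand.2 < b.2)) then some cand else some b)
      = (fun b p => (candidateB q tokens p.1 p.2).elim b (minStep ltA b)) := by
    funext b p
    cases candidateB q tokens p.1 p.2 with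
    | none => rfl
    | some cand => simpa using stepB_eq_minStep b cand
  rw [hstepA, hstepB,
    foldl_build (fun p => candidateB q tokens p.1 p.2) (PySem.List.enumerate columns) [],
    List.nil_append,
    ← foldl_filterMap (fun p => candidateB q tokens p.1 p.2) (minStep ltA) (PySem.List.enumerate columns) none]
  set scored := (PySem.List.enumerate columns).filterMap (fun p => candidateB q tokens p.1 p.2) with hs
  by_cases hempty : scored = []
  · simp [hempty]
  · simp only [hempty, if_false]
    rw [match_head]
    have hsorted : PySem.List.sorted2 scored (fun item => -item.1) (fun item => item.2)
        = scored.foldl (fun acc x => PySem.List.insertBy ltA x acc) [] := rfl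
    rw [hsorted, head_foldl_insertBy]
    rfl
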